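-- pv_equiv track=rewrite | github.com/Aryathel/AdventOfCode2023 | aoc2023/day_1/main.py | find_digit_str_pos
-- ===== SOURCE A (Python) =====
-- DIGITS = [
--     "zero",
--     "one",
--     "two",
--     "three",
--     "four",
--     "five",
--     "six",
--     "seven",
--     "eight",
--     "nine",
-- ]
--
-- def find_digit_str_pos(inp: str) -> tuple[int | None, int | None]:
--     """Finds the first and last printed digit in a string that can be converted to a numerical digit.
--
--     >>> find_digit_str_pos("4nineeightseven2")
--     >>> (9, 7)
--     """
--     # Tracks the position of all digit string indices.
--     firstpos = []
--     lastpos = []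
--
--     # Fetches the index of the first occurrence of a digit string representation,
--     # or -1 if that digit string is not present.
--     for v in DIGITS:
--         try:
--             firstpos.append(inp.index(v))
--         except ValueError:
--             firstpos.append(-1)
--         try:
--             lastpos.append(inp.rindex(v))
--         except ValueError:
--             lastpos.append(-1)
--
--     # Fetch the index of the minimum value from the list of positions, with each index
--     # corresponding to its digit, excluding negatives.
--     # E.G. [-1, -1, 1, 3, -1] -> 1, the index of the max value, which means that the string "two"
--     # was the first detection.
--     try:
--         first = firstpos.index(min([p for p in firstpos if p >= 0]))
--     except ValueError:
--         first = None
--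
--     try:
--         last = lastpos.index(max(p for p in lastpos if p >= 0))
--     except ValueError:
--         last = None
--
--     return first, last
-- ===== SOURCE B (Python) =====
-- DIGITS = [
--     "zero",
--     "one",
--     "two",
--     "three",
--     "four",
--     "five",
--     "six",
--     "seven",
--     "eight",
--     "nine",
-- ]
--
-- def find_digit_str_pos(inp: str) -> tuple:
--     """Single left-to-right scan: at each position take the first digit word that
--     starts there; the first such hit fixes `first`, every hit overwrites `last`."""
--     first = None
--     last = None
--     for i in range(len(inp)):
--         for d, w in enumerate(DIGITS):
--             if inp.startswith(w, i):
--                 if first is None: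
--                     first = d
--                 last = d
--                 break
--     return first, last
-- ===== Notes on version B (the rewrite author's own statement) =====
-- stated objective: simpler
-- what changed: Replaces the per-word index/rindex table plus filter/min/max/argmin-argmax post-processing with one left-to-right scan that checks startswith at each position, fixing `first` on the first hit and overwriting `last` on every hit.
import Mathlib
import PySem

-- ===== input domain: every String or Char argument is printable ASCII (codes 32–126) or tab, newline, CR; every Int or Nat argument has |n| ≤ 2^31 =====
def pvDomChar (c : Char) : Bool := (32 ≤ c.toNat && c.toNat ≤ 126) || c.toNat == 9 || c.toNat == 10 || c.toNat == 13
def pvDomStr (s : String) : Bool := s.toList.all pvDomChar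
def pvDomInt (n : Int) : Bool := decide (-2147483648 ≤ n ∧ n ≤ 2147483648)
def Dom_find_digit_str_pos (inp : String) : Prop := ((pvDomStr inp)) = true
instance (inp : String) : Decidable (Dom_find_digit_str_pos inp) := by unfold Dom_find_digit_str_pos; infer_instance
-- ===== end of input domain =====

-- B replaces A's per-word index/rindex table + filter/min/max/argmin-argmax passes by one
-- left-to-right startswith scan (objective: simpler; same exact return value).

-- ===== PORT A =====
-- module constant DIGITS
def pvDIGITS : List String :=
  ["zero", "one", "two", "three", "four", "five", "six", "seven", "eight", "nine"]

-- 'try: inp.index(v) except ValueError: -1' is exactly str.find, likewise rindex/rfind;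
-- 'try: firstpos.index(min(...)) except ValueError: None' raises only when the filtered list
-- is empty (min of an empty sequence), which is the none branch of min?/max?.
def find_digit_str_pos (inp : String) : Option Int × Option Int :=
  let firstpos : List Int := pvDIGITS.foldl (fun acc v => acc ++ [PySem.Str.find inp v]) []
  let lastpos : List Int := pvDIGITS.foldl (fun acc v => acc ++ [PySem.Str.rfind inp v]) []
  let first : Option Int :=
    match PySem.List.min? (firstpos.filter (fun p => decide (0 ≤ p))) (fun p => p) with
    | none => none
    | some m => (PySem.List.index? firstpos m).map (fun k => (k : Int))
  let last : Option Int :=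
    match PySem.List.max? (lastpos.filter (fun p => decide (0 ≤ p))) (fun p => p) with
    | none => none
    | some m => (PySem.List.index? lastpos m).map (fun k => (k : Int))
  (first, last)

-- ===== PORT B =====
-- inner loop 'for d, w in enumerate(DIGITS): if inp.startswith(w, i): ... break'
def pvFirstMatch (d : Nat) (ws : List String) (suf : List Char) : Option Nat :=
  match ws with
  | [] => none
  | w :: rest =>
    if PySem.Chars.startswith suf w.toList then some d else pvFirstMatch (d + 1) rest suf

-- inp.startswith(w, i) with 0 ≤ i ≤ len(inp) is exactly: w is a prefix of inp[i:] (exact here)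
def pvMatchAt (l : List Char) (i : Nat) : Option Nat := pvFirstMatch 0 pvDIGITS (l.drop i)

def find_digit_str_pos_alt (inp : String) : Option Int × Option Int :=
  (PySem.List.pyRange 0 (PySem.Str.len inp)).foldl
    (fun st i =>
      match pvMatchAt inp.toList i.toNat with
      | none => st
      | some d => (some (st.1.getD (d : Int)), some ((d : Int))))
    (none, none)

-- ===== PRECONDITION & SPEC =====
def Spec_find_digit_str_pos (inp : String) (out : Option Int × Option Int) : Prop := out = find_digit_str_pos_alt inp
instance (inp : String) (out : Option Int × Option Int) : Decidable (Spec_find_digit_str_pos inp out) := by unfold Spec_find_digit_str_pos; infer_instance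

-- ===== CLAIM (what is proved, stated in full; the proofs are below) =====
def Claim_equal_find_digit_str_pos : Prop := ∀ (inp : String), Dom_find_digit_str_pos inp → Spec_find_digit_str_pos inp (find_digit_str_pos inp)

-- ===== LEMMAS AND PROOFS =====

lemma pvDIGITS_toList_ne_nil : ∀ w ∈ pvDIGITS, w.toList ≠ [] := by decide

-- the per-position match list and helper facts

def pvHits (l : List Char) (k : Nat) : List (Nat × Nat) :=
  (List.range k).filterMap (fun i => (pvMatchAt l i).map (fun d => (i, d)))

lemma pvFirstMatch_eq_none_iff (ws : List String) (a : Nat) (suf : List Char) :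
    pvFirstMatch a ws suf = none ↔ ∀ w ∈ ws, ¬ (w.toList <+: suf) := by
  induction ws generalizing a with
  | nil => simp [pvFirstMatch]
  | cons w rest ih =>
    by_cases h : PySem.Chars.startswith suf w.toList
    · simp [pvFirstMatch, h, (PySem.Chars.startswith_iff suf w.toList).1 h]
    · have hstep : pvFirstMatch a (w :: rest) suf = pvFirstMatch (a + 1) rest suf := by
        simp [pvFirstMatch, h]
      rw [hstep, ih (a + 1)]
      constructor
      · intro hall w' hw'
        rcases List.mem_cons.1 hw' with rfl | hm
        · exact fun hp => h ((PySem.Chars.startswith_iff suf w'.toList).2 hp)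
        · exact hall w' hm
      · intro hall w' hw'
        exact hall w' (List.mem_cons_of_mem _ hw')

lemma pvFirstMatch_some (ws : List String) (a : Nat) (suf : List Char) (d : Nat)
    (h : pvFirstMatch a ws suf = some d) :
    ∃ j w, ws[j]? = some w ∧ d = a + j ∧ (w.toList <+: suf) ∧
      ∀ w' ∈ ws.take j, ¬ (w'.toList <+: suf) := by
  induction ws generalizing a with
  | nil => simp [pvFirstMatch] at h
  | cons w rest ih =>
    by_cases hs : PySem.Chars.startswith suf w.toList
    · simp only [pvFirstMatch, hs, if_true, Option.some_inj] at h
      exact ⟨0, w, by simp, by omega, (PySem.Chars.startswith_iff suf w.toList).1 hs, by simp⟩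
    · simp only [pvFirstMatch, hs] at h
      obtain ⟨j, w', hj, hd, hp, htake⟩ := ih (a + 1) h
      refine ⟨j + 1, w', by simpa using hj, by omega, hp, ?_⟩
      intro w'' hw''
      rcases (by simpa using hw'' : w'' = w ∨ w'' ∈ rest.take j) with rfl | hmem
      · exact fun hp' => hs ((PySem.Chars.startswith_iff suf w''.toList).2 hp')
      · exact htake w'' hmem

lemma pvMatchAt_eq_none_iff (l : List Char) (i : Nat) :
    pvMatchAt l i = none ↔ ∀ w ∈ pvDIGITS, ¬ (w.toList <+: l.drop i) :=
  pvFirstMatch_eq_none_iff pvDIGITS 0 (l.drop i)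

lemma pvMatchAt_some (l : List Char) (i : Nat) (d : Nat) (h : pvMatchAt l i = some d) :
    ∃ w, pvDIGITS[d]? = some w ∧ (w.toList <+: l.drop i) ∧
      ∀ w' ∈ pvDIGITS.take d, ¬ (w'.toList <+: l.drop i) := by
  obtain ⟨j, w, hj, hd, hp, htake⟩ := pvFirstMatch_some pvDIGITS 0 (l.drop i) d h
  have : d = j := by omega
  subst this
  exact ⟨w, hj, hp, htake⟩

-- basic facts about prefixes, find and rfind

lemma lt_len_of_prefix {l w : List Char} {i : Nat} (hw : w ≠ []) (h : w <+: l.drop i) :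
    i < l.length := by
  by_contra hc
  have : l.drop i = [] := List.drop_eq_nil_iff.2 (by omega)
  rw [this] at h
  exact hw (List.prefix_nil.1 h)

lemma find_le_of_prefix (l w : List Char) (i : Nat) (h : w <+: l.drop i) :
    0 ≤ PySem.Chars.find l w ∧ PySem.Chars.find l w ≤ (i : Int) := by
  have hin : w <:+: l := (PySem.Chars.isIn_iff_infix w l).1
    ((PySem.Chars.exists_prefix_drop_iff_isIn w l).1 ⟨i, h⟩)
  have h0 : 0 ≤ PySem.Chars.find l w := (PySem.Chars.find_nonneg_iff l w).2 hin
  refine ⟨h0, ?_⟩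
  have hmin := (PySem.Chars.find_spec h0).2
  by_contra hc
  exact hmin i (by omega) h

lemma rfind_go_neg (s sub : List Char) (j : Nat) (h : PySem.Chars.rfind.go s sub j < 0) :
    ∀ i ≤ j, ¬ sub <+: s.drop i := by
  induction j with
  | zero =>
    intro i hi hp
    interval_cases i
    simp only [PySem.Chars.rfind.go] at h
    rw [if_pos (List.isPrefixOf_iff_prefix.2 (by simpa using hp))] at h
    omega
  | succ j ih =>
    intro i hi hp
    have hgo : PySem.Chars.rfind.go s sub (j + 1) =
        if sub.isPrefixOf (s.drop (j + 1)) then ((j : Int) + 1) else PySem.Chars.rfind.go s sub j := by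
      simp [PySem.Chars.rfind.go]
    rcases Nat.lt_or_ge i (j + 1) with hlt | hge
    · rcases hpj : sub.isPrefixOf (s.drop (j + 1)) with _ | _
      · rw [hgo, hpj, if_neg (by simp)] at h
        exact ih h i (by omega) hp
      · rw [hgo, hpj, if_pos rfl] at h
        omega
    · have : i = j + 1 := by omega
      subst this
      rw [hgo, if_pos (List.isPrefixOf_iff_prefix.2 hp)] at h
      omega

lemma rfind_go_spec (s sub : List Char) (j : Nat) (h : 0 ≤ PySem.Chars.rfind.go s sub j) :
    (PySem.Chars.rfind.go s sub j).toNat ≤ j ∧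
    (sub <+: s.drop (PySem.Chars.rfind.go s sub j).toNat) ∧
    ∀ i, (PySem.Chars.rfind.go s sub j).toNat < i → i ≤ j → ¬ sub <+: s.drop i := by
  induction j with
  | zero =>
    rcases hp : sub.isPrefixOf s with _ | _
    · simp only [PySem.Chars.rfind.go, hp, Bool.false_eq_true, if_false] at h
      omega
    · have hg : PySem.Chars.rfind.go s sub 0 = 0 := by
        simp [PySem.Chars.rfind.go, hp]
      rw [hg]
      refine ⟨by omega, by simpa using List.isPrefixOf_iff_prefix.1 hp, ?_⟩
      intro i h1 h2
      omega
  | succ j ih =>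
    have hgo : PySem.Chars.rfind.go s sub (j + 1) =
        if sub.isPrefixOf (s.drop (j + 1)) then ((j : Int) + 1) else PySem.Chars.rfind.go s sub j := by
      simp [PySem.Chars.rfind.go]
    rcases hp : sub.isPrefixOf (s.drop (j + 1)) with _ | _
    · rw [hgo, hp] at h ⊢
      rw [if_neg (by simp)] at h ⊢
      obtain ⟨h1, h2, h3⟩ := ih h
      refine ⟨by omega, h2, ?_⟩
      intro i hi1 hi2
      rcases Nat.lt_or_ge i (j + 1) with hlt | hge
      · exact h3 i hi1 (by omega)
      · have : i = j + 1 := by omega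
        subst this
        intro hpre
        rw [List.isPrefixOf_iff_prefix.2 hpre] at hp
        simp at hp
    · rw [hgo, hp, if_pos rfl]
      refine ⟨by omega, by simpa using List.isPrefixOf_iff_prefix.1 hp, ?_⟩
      intro i h1 h2
      omega

lemma rfind_neg_no_prefix (l w : List Char) (h : PySem.Chars.rfind l w < 0) (i : Nat) :
    ¬ w <+: l.drop i := by
  intro hp
  unfold PySem.Chars.rfind at h
  rcases Nat.lt_or_ge l.length i with h2 | h1
  case inr => exact rfind_go_neg l w l.length h i h1 hp
  · have hnil : l.drop i = [] := List.drop_eq_nil_iff.2 (by omega)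
    rw [hnil] at hp
    have : w = [] := List.prefix_nil.1 hp
    subst this
    exact rfind_go_neg l [] l.length h 0 (by omega) (List.nil_prefix)

lemma rfind_ge_of_prefix (l w : List Char) (i : Nat) (hw : w ≠ []) (h : w <+: l.drop i) :
    0 ≤ PySem.Chars.rfind l w ∧ (i : Int) ≤ PySem.Chars.rfind l w := by
  have hlen : i < l.length := lt_len_of_prefix hw h
  have h0 : 0 ≤ PySem.Chars.rfind l w := by
    by_contra hc
    exact rfind_neg_no_prefix l w (by omega) i h
  refine ⟨h0, ?_⟩
  unfold PySem.Chars.rfind at h0 ⊢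
  obtain ⟨_, _, h3⟩ := rfind_go_spec l w l.length h0
  by_contra hc
  exact h3 i (by omega) (by omega) h

lemma prefix_at_rfind (l w : List Char) (h : 0 ≤ PySem.Chars.rfind l w) :
    w <+: l.drop (PySem.Chars.rfind l w).toNat := by
  unfold PySem.Chars.rfind at h ⊢
  exact (rfind_go_spec l w l.length h).2.1

-- pvHits structure

lemma pvHits_succ (l : List Char) (k : Nat) :
    pvHits l (k + 1) = pvHits l k ++ ((pvMatchAt l k).map (fun d => (k, d))).toList := by
  simp only [pvHits, List.range_succ, List.filterMap_append]
  cases hm : pvMatchAt l k <;> simp [hm]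

lemma pvHits_eq_nil_iff (l : List Char) (k : Nat) :
    pvHits l k = [] ↔ ∀ i < k, pvMatchAt l i = none := by
  simp [pvHits, List.filterMap_eq_nil_iff]

lemma pvHits_head (l : List Char) (k : Nat) (i d : Nat)
    (h : (pvHits l k).head? = some (i, d)) :
    i < k ∧ pvMatchAt l i = some d ∧ ∀ j < i, pvMatchAt l j = none := by
  induction k with
  | zero => simp [pvHits] at h
  | succ k ih =>
    rw [pvHits_succ, List.head?_append] at h
    rcases hA : (pvHits l k).head? with _ | p
    · rw [hA, Option.none_or] at h
      have hnil : pvHits l k = [] := by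
        cases hl : pvHits l k with
        | nil => rfl
        | cons a t => rw [hl] at hA; simp at hA
      rcases hm : pvMatchAt l k with _ | d'
      · rw [hm] at h; simp at h
      · rw [hm] at h
        simp only [Option.map_some, Option.toList_some, List.head?_cons, Option.some_inj] at h
        have h1' : k = i := congrArg Prod.fst h
        have h2' : d' = d := congrArg Prod.snd h
        subst h1'
        subst h2'
        exact ⟨by omega, hm, fun j hj => (pvHits_eq_nil_iff l k).1 hnil j (by omega)⟩
    · rw [hA, Option.some_or] at h
      obtain rfl : p = (i, d) := by simpa using h
      obtain ⟨h1, h2, h3⟩ := ih hA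
      exact ⟨by omega, h2, h3⟩

lemma pvHits_getLast (l : List Char) (k : Nat) (i d : Nat)
    (h : (pvHits l k).getLast? = some (i, d)) :
    i < k ∧ pvMatchAt l i = some d ∧ ∀ j, i < j → j < k → pvMatchAt l j = none := by
  induction k with
  | zero => simp [pvHits] at h
  | succ k ih =>
    rw [pvHits_succ] at h
    rcases hm : pvMatchAt l k with _ | d'
    · rw [hm] at h
      simp only [Option.map_none, Option.toList_none, List.append_nil] at h
      obtain ⟨h1, h2, h3⟩ := ih h
      refine ⟨by omega, h2, ?_⟩
      intro j hj1 hj2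
      rcases Nat.lt_or_ge j k with hlt | hge
      · exact h3 j hj1 hlt
      · have : j = k := by omega
        subst this; exact hm
    · rw [hm] at h
      simp only [Option.map_some, Option.toList_some, List.getLast?_concat, Option.some_inj] at h
      have h1' : k = i := congrArg Prod.fst h
      have h2' : d' = d := congrArg Prod.snd h
      subst h1'
      subst h2'
      exact ⟨by omega, hm, fun j hj1 hj2 => by omega⟩

-- the scan computes head/last of pvHits

lemma scan_spec (l : List Char) (k : Nat) :
    (List.range k).foldl
      (fun st i =>
        match pvMatchAt l i with
        | none => st
        | some d => (some (st.1.getD (d : Int)), some ((d : Int))))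
      ((none : Option Int), (none : Option Int))
    = ((pvHits l k).head?.map (fun p => (p.2 : Int)),
       (pvHits l k).getLast?.map (fun p => (p.2 : Int))) := by
  induction k with
  | zero => simp [pvHits]
  | succ k ih =>
    rw [List.range_succ, List.foldl_append, ih, pvHits_succ]
    rcases hm : pvMatchAt l k with _ | d
    · simp [hm]
    · simp only [List.foldl_cons, List.foldl_nil, hm, Option.map_some, Option.toList_some]
      rcases hA : (pvHits l k).head? with _ | p
      · have hnil : pvHits l k = [] := by
          cases hl : pvHits l k with
          | nil => rfl
          | cons a t => rw [hl] at hA; simp at hA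
        simp [hnil]
      · simp [hA, List.head?_append]

-- B in terms of pvHits

lemma alt_eq (inp : String) :
    find_digit_str_pos_alt inp =
      ((pvHits inp.toList inp.toList.length).head?.map (fun p => (p.2 : Int)),
       (pvHits inp.toList inp.toList.length).getLast?.map (fun p => (p.2 : Int))) := by
  unfold find_digit_str_pos_alt
  rw [PySem.Str.len_eq, PySem.List.pyRange_zero_natCast, List.foldl_map]
  simp only [Int.toNat_natCast]
  exact scan_spec inp.toList inp.toList.length

-- A in terms of the find/rfind maps

def pvF (l : List Char) : List Int := pvDIGITS.map (fun v => PySem.Chars.find l v.toList)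
def pvR (l : List Char) : List Int := pvDIGITS.map (fun v => PySem.Chars.rfind l v.toList)

lemma A_eq (inp : String) :
    find_digit_str_pos inp =
      ((match PySem.List.min? ((pvF inp.toList).filter (fun p => decide (0 ≤ p))) (fun p => p) with
        | none => none
        | some m => (PySem.List.index? (pvF inp.toList) m).map (fun k => (k : Int))),
       (match PySem.List.max? ((pvR inp.toList).filter (fun p => decide (0 ≤ p))) (fun p => p) with
        | none => none
        | some m => (PySem.List.index? (pvR inp.toList) m).map (fun k => (k : Int)))) := by
  unfold find_digit_str_pos pvF pvR
  simp only [PySem.List.foldl_append_singleton_eq_map, List.nil_append,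
    PySem.Str.find_eq, PySem.Str.rfind_eq]

lemma index?_of_props {α : Type} [BEq α] [LawfulBEq α] (xs : List α) (v : α) (k : Nat)
    (h1 : xs[k]? = some v) (h2 : ∀ j < k, xs[j]? ≠ some v) :
    PySem.List.index? xs v = some k := by
  induction xs generalizing k with
  | nil => simp at h1
  | cons x t ih =>
    cases k with
    | zero =>
      obtain rfl : x = v := by simpa using h1
      exact PySem.List.index?_cons_self x t
    | succ k =>
      have hx : x ≠ v := by
        intro hxv
        exact h2 0 (by omega) (by simp [hxv])
      rw [PySem.List.index?_cons_of_ne t hx]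
      have := ih k (by simpa using h1) (fun j hj => by simpa using h2 (j + 1) (by omega))
      rw [this]
      rfl

-- the first component

lemma first_eq (l : List Char) :
    (match PySem.List.min? ((pvF l).filter (fun p => decide (0 ≤ p))) (fun p => p) with
     | none => none
     | some m => (PySem.List.index? (pvF l) m).map (fun k => (k : Int)))
    = (pvHits l l.length).head?.map (fun p => ((p.2 : Int))) := by
  rcases hmin : PySem.List.min? ((pvF l).filter (fun p => decide (0 ≤ p))) (fun p => p) with _ | m
  · have hfil := (PySem.List.min?_eq_none_iff _ _).1 hmin
    have hneg : ∀ p ∈ pvF l, p < 0 := by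
      intro p hp
      have := List.filter_eq_nil_iff.1 hfil p hp
      simpa using this
    have hnil : pvHits l l.length = [] := by
      rw [pvHits_eq_nil_iff]
      intro i _
      rw [pvMatchAt_eq_none_iff]
      intro w hw hpre
      have h0 := (find_le_of_prefix l w.toList i hpre).1
      have hmem : PySem.Chars.find l w.toList ∈ pvF l := List.mem_map.2 ⟨w, hw, rfl⟩
      have := hneg _ hmem
      omega
    simp [hnil]
  · have hm' := PySem.List.min?_mem hmin
    have hm0 : 0 ≤ m := by
      have := (List.mem_filter.1 hm').2
      simpa using this
    have hmF : m ∈ pvF l := (List.mem_filter.1 hm').1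
    have hmin_le : ∀ p ∈ pvF l, 0 ≤ p → m ≤ p := by
      intro p hp h0
      exact PySem.List.min?_isMin hmin p (List.mem_filter.2 ⟨hp, by simpa using h0⟩)
    obtain ⟨v, hv, hfv⟩ := List.mem_map.1 hmF
    have h0v : 0 ≤ PySem.Chars.find l v.toList := by rw [hfv]; exact hm0
    have hpref : v.toList <+: l.drop m.toNat := by
      have := (PySem.Chars.find_spec h0v).1
      rwa [hfv] at this
    have hlt : m.toNat < l.length := lt_len_of_prefix (pvDIGITS_toList_ne_nil v hv) hpref
    have hmm : pvMatchAt l m.toNat ≠ none := by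
      intro hnone
      exact (pvMatchAt_eq_none_iff l m.toNat).1 hnone v hv hpref
    have hhits_ne : pvHits l l.length ≠ [] := by
      intro hnil
      exact hmm ((pvHits_eq_nil_iff l l.length).1 hnil m.toNat hlt)
    obtain ⟨⟨i, d⟩, hhead⟩ : ∃ p, (pvHits l l.length).head? = some p := by
      cases hl : pvHits l l.length with
      | nil => exact absurd hl hhits_ne
      | cons a t => exact ⟨a, by simp⟩
    obtain ⟨hik, hmd, hbefore⟩ := pvHits_head l l.length i d hhead
    obtain ⟨w, hwd, hwpre, hwtake⟩ := pvMatchAt_some l i d hmd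
    have hwmem : w ∈ pvDIGITS := List.mem_of_getElem? hwd
    have hi_le : i ≤ m.toNat := by
      by_contra hc
      exact hmm (hbefore m.toNat (by omega))
    have hfw := find_le_of_prefix l w.toList i hwpre
    have hm_le_i : m ≤ (i : Int) :=
      le_trans (hmin_le _ (List.mem_map.2 ⟨w, hwmem, rfl⟩) hfw.1) hfw.2
    have hmi : m = (i : Int) := by omega
    have hfind_w : PySem.Chars.find l w.toList = m := by
      have hge : m ≤ PySem.Chars.find l w.toList :=
        hmin_le _ (List.mem_map.2 ⟨w, hwmem, rfl⟩) hfw.1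
      omega
    have hFd : (pvF l)[d]? = some m := by
      simp [pvF, List.getElem?_map, hwd, hfind_w]
    have hFe : ∀ e, e < d → (pvF l)[e]? ≠ some m := by
      intro e he hcontra
      rw [pvF, List.getElem?_map] at hcontra
      obtain ⟨w', hw', hfw'⟩ := Option.map_eq_some_iff.1 hcontra
      have h0' : 0 ≤ PySem.Chars.find l w'.toList := by rw [hfw']; exact hm0
      have hpre' : w'.toList <+: l.drop i := by
        have := (PySem.Chars.find_spec h0').1
        rw [hfw', hmi] at this
        simpa using this
      have hmem' : w' ∈ pvDIGITS.take d := by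
        apply List.mem_of_getElem? (i := e)
        rw [List.getElem?_take, if_pos he]
        exact hw'
      exact hwtake w' hmem' hpre'
    have hidx := index?_of_props (pvF l) m d hFd (fun j hj => hFe j hj)
    rw [PySem.List.index?_eq_idxOf?] at hidx
    simp [hidx, hhead]

-- the last component

lemma last_eq (l : List Char) :
    (match PySem.List.max? ((pvR l).filter (fun p => decide (0 ≤ p))) (fun p => p) with
     | none => none
     | some m => (PySem.List.index? (pvR l) m).map (fun k => (k : Int)))
    = (pvHits l l.length).getLast?.map (fun p => ((p.2 : Int))) := by
  rcases hmax : PySem.List.max? ((pvR l).filter (fun p => decide (0 ≤ p))) (fun p => p) with _ | m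
  · have hfil := (PySem.List.max?_eq_none_iff _ _).1 hmax
    have hneg : ∀ p ∈ pvR l, p < 0 := by
      intro p hp
      have := List.filter_eq_nil_iff.1 hfil p hp
      simpa using this
    have hnil : pvHits l l.length = [] := by
      rw [pvHits_eq_nil_iff]
      intro i _
      rw [pvMatchAt_eq_none_iff]
      intro w hw hpre
      have hmem : PySem.Chars.rfind l w.toList ∈ pvR l := List.mem_map.2 ⟨w, hw, rfl⟩
      exact rfind_neg_no_prefix l w.toList (hneg _ hmem) i hpre
    simp [hnil]
  · have hm' := PySem.List.max?_mem hmax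
    have hm0 : 0 ≤ m := by
      have := (List.mem_filter.1 hm').2
      simpa using this
    have hmR : m ∈ pvR l := (List.mem_filter.1 hm').1
    have hmax_ge : ∀ p ∈ pvR l, 0 ≤ p → p ≤ m := by
      intro p hp h0
      exact PySem.List.max?_isMax hmax p (List.mem_filter.2 ⟨hp, by simpa using h0⟩)
    obtain ⟨v, hv, hfv⟩ := List.mem_map.1 hmR
    have h0v : 0 ≤ PySem.Chars.rfind l v.toList := by rw [hfv]; exact hm0
    have hpref : v.toList <+: l.drop m.toNat := by
      have := prefix_at_rfind l v.toList h0v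
      rwa [hfv] at this
    have hlt : m.toNat < l.length := lt_len_of_prefix (pvDIGITS_toList_ne_nil v hv) hpref
    have hmm : pvMatchAt l m.toNat ≠ none := by
      intro hnone
      exact (pvMatchAt_eq_none_iff l m.toNat).1 hnone v hv hpref
    have hhits_ne : pvHits l l.length ≠ [] := by
      intro hnil
      exact hmm ((pvHits_eq_nil_iff l l.length).1 hnil m.toNat hlt)
    obtain ⟨⟨i, d⟩, hlast⟩ : ∃ p, (pvHits l l.length).getLast? = some p :=
      Option.isSome_iff_exists.1 (List.getLast?_isSome.2 hhits_ne)
    obtain ⟨hik, hmd, hafter⟩ := pvHits_getLast l l.length i d hlast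
    obtain ⟨w, hwd, hwpre, hwtake⟩ := pvMatchAt_some l i d hmd
    have hwmem : w ∈ pvDIGITS := List.mem_of_getElem? hwd
    have hm_le : m.toNat ≤ i := by
      by_contra hc
      exact hmm (hafter m.toNat (by omega) hlt)
    have hrw := rfind_ge_of_prefix l w.toList i (pvDIGITS_toList_ne_nil w hwmem) hwpre
    have hi_le_m : (i : Int) ≤ m :=
      le_trans hrw.2 (hmax_ge _ (List.mem_map.2 ⟨w, hwmem, rfl⟩) hrw.1)
    have hmi : m = (i : Int) := by omega
    have hrfind_w : PySem.Chars.rfind l w.toList = m := by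
      have hle : PySem.Chars.rfind l w.toList ≤ m :=
        hmax_ge _ (List.mem_map.2 ⟨w, hwmem, rfl⟩) hrw.1
      omega
    have hFd : (pvR l)[d]? = some m := by
      simp [pvR, List.getElem?_map, hwd, hrfind_w]
    have hFe : ∀ e, e < d → (pvR l)[e]? ≠ some m := by
      intro e he hcontra
      rw [pvR, List.getElem?_map] at hcontra
      obtain ⟨w', hw', hfw'⟩ := Option.map_eq_some_iff.1 hcontra
      have h0' : 0 ≤ PySem.Chars.rfind l w'.toList := by rw [hfw']; exact hm0
      have hpre' : w'.toList <+: l.drop i := by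
        have := prefix_at_rfind l w'.toList h0'
        rw [hfw', hmi] at this
        simpa using this
      have hmem' : w' ∈ pvDIGITS.take d := by
        apply List.mem_of_getElem? (i := e)
        rw [List.getElem?_take, if_pos he]
        exact hw'
      exact hwtake w' hmem' hpre'
    have hidx := index?_of_props (pvR l) m d hFd (fun j hj => hFe j hj)
    rw [PySem.List.index?_eq_idxOf?] at hidx
    simp [hidx, hlast]

-- ===== VERDICT (by name: the statement is the Claim_ definition above) =====
theorem find_digit_str_pos_spec : Claim_equal_find_digit_str_pos := by
  intro inp _
  unfold Spec_find_digit_str_pos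
  rw [A_eq inp, alt_eq inp]
  exact Prod.ext (first_eq inp.toList) (last_eq inp.toList)
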